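-- pv_equiv track=rewrite | github.com/PaulDVS/C343PaulVSClassWork | Python classes/zybooks/27.44.py | SimulateLine
-- ===== SOURCE A (Python) =====
-- def SimulateLine(customerArrivals):
--     customerInLine = []
--     lineLength=0
--     for x in customerArrivals:
--         lineLength += int(x)
--         customerInLine.append(lineLength)
--         if(lineLength>0):
--             lineLength -= 1
--     return customerInLine
-- ===== SOURCE B (Python) =====
-- from itertools import accumulate
--
-- def SimulateLine(customerArrivals):
--     # Stage 1: cumulative arrival totals, ignoring departures entirely.
--     totals = list(accumulate(map(int, customerArrivals)))
--     # Stage 2: correct each total by the number of departures that happened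
--     # before it; a departure occurs after every step whose recorded length
--     # is positive (out_i = S_i - #{j < i : out_j > 0}).
--     out = []
--     departed = 0
--     for s in totals:
--         n = s - departed
--         out.append(n)
--         if n > 0:
--             departed += 1
--     return out
-- ===== Notes on version B (the rewrite author's own statement) =====
-- stated objective: alternative
-- what changed: Splits the simulation into two staged passes: first plain cumulative arrival totals with no departure logic, then a separate correction pass subtracting a running departure count (using out_i = S_i - #{j<i : out_j>0}), instead of A's single loop that interleaves adding arrivals with decrementing the live line length.
import Mathlib
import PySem

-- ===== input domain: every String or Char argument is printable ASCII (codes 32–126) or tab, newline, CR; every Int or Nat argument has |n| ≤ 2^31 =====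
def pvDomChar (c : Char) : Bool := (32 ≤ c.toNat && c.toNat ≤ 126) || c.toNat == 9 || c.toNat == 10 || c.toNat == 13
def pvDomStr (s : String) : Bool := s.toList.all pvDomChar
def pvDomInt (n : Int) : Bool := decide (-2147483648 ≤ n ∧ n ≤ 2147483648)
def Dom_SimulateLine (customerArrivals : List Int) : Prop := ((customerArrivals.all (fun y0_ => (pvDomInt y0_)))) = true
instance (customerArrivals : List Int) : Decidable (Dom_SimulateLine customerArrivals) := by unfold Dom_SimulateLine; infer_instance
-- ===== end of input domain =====

-- B replaces A's single interleaved loop by two staged passes (plain cumulative totals, then a departure-count correction); alternative decomposition, same cost.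
-- ===== PORT A =====
-- single loop: state (customerInLine, lineLength); add arrival, append, conditionally decrement
def SimulateLine (customerArrivals : List Int) : List Int :=
  (customerArrivals.foldl
    (fun (st : List Int × Int) x =>
      let lineLength := st.2 + x
      let customerInLine := st.1 ++ [lineLength]
      if lineLength > 0 then (customerInLine, lineLength - 1)
      else (customerInLine, lineLength))
    ([], 0)).1

-- ===== PORT B =====
-- stage 1: cumulative arrival totals (itertools.accumulate)
def totalsFrom (acc : Int) : List Int → List Int
  | [] => []
  | a :: rest => (acc + a) :: totalsFrom (acc + a) rest

-- stage 2: subtract the running departure count from each total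
def correctFrom (departed : Int) : List Int → List Int
  | [] => []
  | s :: rest =>
    let n := s - departed
    n :: correctFrom (if n > 0 then departed + 1 else departed) rest

def SimulateLine_alt (customerArrivals : List Int) : List Int :=
  correctFrom 0 (totalsFrom 0 customerArrivals)

-- ===== PRECONDITION & SPEC =====
def Spec_SimulateLine (customerArrivals : List Int) (out : List Int) : Prop := out = SimulateLine_alt customerArrivals
instance (customerArrivals : List Int) (out : List Int) : Decidable (Spec_SimulateLine customerArrivals out) := by unfold Spec_SimulateLine; infer_instance

-- ===== CLAIM (what is proved, stated in full; the proofs are below) =====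
def Claim_equal_SimulateLine : Prop := ∀ (customerArrivals : List Int), Dom_SimulateLine customerArrivals → Spec_SimulateLine customerArrivals (SimulateLine customerArrivals)

-- ===== LEMMAS AND PROOFS =====
-- invariant: A's lineLength equals (running total c) − (departure count d)
theorem foldl_eq_staged (xs : List Int) : ∀ (acc : List Int) (c d : Int),
    (xs.foldl
      (fun (st : List Int × Int) x =>
        let lineLength := st.2 + x
        let customerInLine := st.1 ++ [lineLength]
        if lineLength > 0 then (customerInLine, lineLength - 1)
        else (customerInLine, lineLength))
      (acc, c - d)).1
    = acc ++ correctFrom d (totalsFrom c xs) := by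
  induction xs with
  | nil => intro acc c d; simp [totalsFrom, correctFrom]
  | cons a rest ih =>
    intro acc c d
    simp only [List.foldl, totalsFrom, correctFrom]
    have e : c - d + a = (c + a) - d := by ring
    rw [e]
    by_cases hc : (c + a) - d > 0
    · rw [if_pos hc, if_pos hc]
      have h2 := ih (acc ++ [(c + a) - d]) (c + a) (d + 1)
      have e2 : (c + a) - (d + 1) = (c + a) - d - 1 := by ring
      rw [e2] at h2
      rw [h2]; simp
    · rw [if_neg hc, if_neg hc]
      have h2 := ih (acc ++ [(c + a) - d]) (c + a) d
      rw [h2]; simp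

-- ===== VERDICT (by name: the statement is the Claim_ definition above) =====
theorem SimulateLine_spec : Claim_equal_SimulateLine := by
  intro xs _
  unfold Spec_SimulateLine SimulateLine SimulateLine_alt
  have := foldl_eq_staged xs [] 0 0
  simpa using this
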